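-- pv_equiv track=rewrite | github.com/tmllab/2025_ICLR_FLOW | Tetris_match3_flow.py | drop_gems
-- ===== SOURCE A (Python) =====
-- def drop_gems(gem_grid):
--     rows = len(gem_grid)
--     cols = len(gem_grid[0])
--     for c in range(cols):
--         empty_slots = []
--         for r in range(rows - 1, -1, -1):
--             if gem_grid[r][c] is None:
--                 empty_slots.append(r)
--             elif empty_slots:
--                 empty_r = empty_slots.pop(0)
--                 gem_grid[empty_r][c] = gem_grid[r][c]
--                 gem_grid[r][c] = None
--                 empty_slots.append(r)
--     return gem_grid
-- ===== SOURCE B (Python) =====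
-- def drop_gems(gem_grid):
--     rows = len(gem_grid)
--     cols = len(gem_grid[0])
--     for c in range(cols):
--         gems = [gem_grid[r][c] for r in range(rows) if gem_grid[r][c] is not None]
--         pad = rows - len(gems)
--         for r in range(rows):
--             gem_grid[r][c] = None if r < pad else gems[r - pad]
--     return gem_grid
-- ===== Notes on version B (the rewrite author's own statement) =====
-- stated objective: alternative
-- what changed: Per column, B reads the non-None gems once top-to-bottom and rewrites the column as Nones followed by the gems (compaction), instead of A's bottom-up scan that maintains a queue of empty-slot indices with pop(0) and moves gems one at a time.
import Mathlib
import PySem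

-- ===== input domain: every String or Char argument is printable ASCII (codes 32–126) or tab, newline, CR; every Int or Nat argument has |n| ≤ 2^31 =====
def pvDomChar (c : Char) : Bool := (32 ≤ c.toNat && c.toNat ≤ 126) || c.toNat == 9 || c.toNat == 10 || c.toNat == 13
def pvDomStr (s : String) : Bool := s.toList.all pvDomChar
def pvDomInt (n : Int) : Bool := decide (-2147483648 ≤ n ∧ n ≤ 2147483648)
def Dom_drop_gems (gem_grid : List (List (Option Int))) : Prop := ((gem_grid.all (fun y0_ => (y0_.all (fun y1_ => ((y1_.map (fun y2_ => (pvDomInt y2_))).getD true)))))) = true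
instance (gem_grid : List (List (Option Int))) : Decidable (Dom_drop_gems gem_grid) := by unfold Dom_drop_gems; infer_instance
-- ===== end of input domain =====

-- B replaces A's bottom-up empty-slot queue (pop(0)) by a per-column compaction: the non-None
-- gems are read once top-to-bottom and the column is rewritten as Nones followed by the gems.
-- Both Pythons mutate gem_grid in place identically and return it; the theorems are about the returned value.

-- ===== PORT A =====
-- gem_grid[r][c] (r, c always in range under Pre_; getD is exact there)
def getCell (g : List (List (Option Int))) (r c : Nat) : Option Int :=
  (g.getD r []).getD c none

-- gem_grid[r][c] = v
def setCell (g : List (List (Option Int))) (r c : Nat) (v : Option Int) : List (List (Option Int)) :=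
  g.set r ((g.getD r []).set c v)

-- body of A's inner loop: state = (grid, empty_slots)
def stepA (c : Nat) (s : List (List (Option Int)) × List Nat) (r : Nat) :
    List (List (Option Int)) × List Nat :=
  match getCell s.1 r c with
  | none => (s.1, s.2 ++ [r])
  | some v =>
    match s.2 with
    | [] => s
    | e :: rest => (setCell (setCell s.1 e c (some v)) r c none, rest ++ [r])

def drop_gems (gem_grid : List (List (Option Int))) : List (List (Option Int)) :=
  let rows := gem_grid.length
  let cols := (gem_grid.headD []).length
  (List.range cols).foldl
    (fun g c => (((List.range rows).reverse).foldl (stepA c) (g, ([] : List Nat))).1)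
    gem_grid

-- ===== PORT B =====
-- body of B's per-column rewrite loop: gem_grid[r][c] = None if r < pad else gems[r-pad]
def stepB (c pad : Nat) (gems : List Int) (g : List (List (Option Int))) (r : Nat) :
    List (List (Option Int)) :=
  setCell g r c (if r < pad then none else some (gems.getD (r - pad) 0))

def drop_gems_alt (gem_grid : List (List (Option Int))) : List (List (Option Int)) :=
  let rows := gem_grid.length
  let cols := (gem_grid.headD []).length
  (List.range cols).foldl
    (fun g c =>
      let gems : List Int := (List.range rows).filterMap (fun r => getCell g r c)
      let pad := rows - gems.length
      (List.range rows).foldl (stepB c pad gems) g)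
    gem_grid

-- ===== PRECONDITION & SPEC =====
-- Pre_ is exactly A's return domain: on the empty grid A raises IndexError computing cols, and on
-- a grid with some row shorter than the first row A raises IndexError reading a cell; B raises there too.
def Pre_drop_gems (gem_grid : List (List (Option Int))) : Prop :=
  gem_grid ≠ [] ∧ ∀ row ∈ gem_grid, (gem_grid.headD []).length ≤ row.length
instance (gem_grid : List (List (Option Int))) : Decidable (Pre_drop_gems gem_grid) := by
  unfold Pre_drop_gems; infer_instance

def pvWitness_drop_gems : List (List (Option Int)) :=
  [[some 1, none], [none, some 2], [none, none]]

def Spec_drop_gems (gem_grid : List (List (Option Int))) (out : List (List (Option Int))) : Prop := out = drop_gems_alt gem_grid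
instance (gem_grid : List (List (Option Int))) (out : List (List (Option Int))) : Decidable (Spec_drop_gems gem_grid out) := by unfold Spec_drop_gems; infer_instance

-- ===== CLAIM (what is proved, stated in full; the proofs are below) =====
def Claim_equal_drop_gems : Prop := ∀ (gem_grid : List (List (Option Int))), Dom_drop_gems gem_grid → Pre_drop_gems gem_grid → Spec_drop_gems gem_grid (drop_gems gem_grid)

-- ===== LEMMAS AND PROOFS =====

-- the gravity result on one column: Nones first, then the gems in order
def dropCol (col : List (Option Int)) : List (Option Int) :=
  List.replicate (col.length - (col.filterMap id).length) none ++ (col.filterMap id).map some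

-- A's inner-loop body acting on the column alone
def stepCol (s : List (Option Int) × List Nat) (r : Nat) : List (Option Int) × List Nat :=
  match s.1.getD r none with
  | none => (s.1, s.2 ++ [r])
  | some v =>
    match s.2 with
    | [] => s
    | e :: rest => ((s.1.set e (some v)).set r none, rest ++ [r])

-- replace column c of g by col (parallel; col.length = g.length in all uses)
def setColumn (g : List (List (Option Int))) (c : Nat) (col : List (Option Int)) :
    List (List (Option Int)) :=
  List.zipWith (fun row v => row.set c v) g col

def colOf (g : List (List (Option Int))) (c : Nat) : List (Option Int) :=
  g.map (fun row => row.getD c none)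

theorem length_filterMap_le' (col : List (Option Int)) : (col.filterMap id).length ≤ col.length :=
  List.length_filterMap_le _ _

theorem stepCol_none (L : List (Option Int)) (es : List Nat) (r : Nat)
    (h : L.getD r none = none) : stepCol (L, es) r = (L, es ++ [r]) := by
  simp only [stepCol, List.getD] at h ⊢
  simp [h]

theorem stepCol_some_nil (L : List (Option Int)) (r : Nat) (v : Int)
    (h : L.getD r none = some v) : stepCol (L, []) r = (L, []) := by
  simp only [stepCol, List.getD] at h ⊢
  simp [h]

theorem stepCol_some_cons (L : List (Option Int)) (es : List Nat) (r e : Nat) (v : Int)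
    (h : L.getD r none = some v) :
    stepCol (L, e :: es) r = ((L.set e (some v)).set r none, es ++ [r]) := by
  simp only [stepCol, List.getD] at h ⊢
  simp [h]

theorem getD_append_len (p : List (Option Int)) (x : Option Int) (rest : List (Option Int)) :
    (p ++ x :: rest).getD p.length none = x := by
  simp [List.getD]

theorem es_snoc (k pad : Nat) :
    ((List.range pad).map (fun i => (k + 1) + i)).reverse ++ [k]
      = ((List.range (pad + 1)).map (fun i => k + i)).reverse := by
  rw [List.range_succ_eq_map]
  simp only [List.map_cons, List.map_map, List.reverse_cons, Nat.add_zero]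
  congr 2
  apply List.map_congr_left
  intro i _
  simp [Function.comp, Nat.succ_eq_add_one]
  omega

theorem es_head (k pad : Nat) :
    ((List.range (pad + 1)).map (fun i => (k + 1) + i)).reverse
      = (k + 1 + pad) :: ((List.range pad).map (fun i => (k + 1) + i)).reverse := by
  rw [List.range_succ]
  simp

-- ---- core invariant of A's inner loop on a single column ----
theorem tail_none (p' t : List (Option Int)) (pad : Nat) :
    List.replicate ((pad + 1) + (p'.length - (p'.filterMap id).length)) (none : Option Int)
        ++ (p'.filterMap id).map some ++ t
      = List.replicate (pad + ((p' ++ [none]).length - ((p' ++ [none]).filterMap id).length))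
          (none : Option Int) ++ ((p' ++ [none]).filterMap id).map some ++ t := by
  have hG : (List.filterMap (fun x : Option Int => x) p').length ≤ p'.length :=
    List.length_filterMap_le _ _
  simp [List.filterMap_append]
  omega

theorem tail_some (p' t : List (Option Int)) (v : Int) (pad : Nat) :
    List.replicate (pad + (p'.length - (p'.filterMap id).length)) (none : Option Int)
        ++ (p'.filterMap id).map some ++ (some v :: t)
      = List.replicate (pad + ((p' ++ [some v]).length - ((p' ++ [some v]).filterMap id).length))
          (none : Option Int) ++ ((p' ++ [some v]).filterMap id).map some ++ t := by
  have hG : (List.filterMap (fun x : Option Int => x) p').length ≤ p'.length :=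
    List.length_filterMap_le _ _
  simp [List.filterMap_append]

theorem cons_none_replicate (n : Nat) (X : List (Option Int)) :
    (none : Option Int) :: (List.replicate n none ++ X)
      = List.replicate n none ++ none :: X := by
  induction n with
  | zero => simp
  | succ n ih => simp [List.replicate_succ, ih]

theorem loopA (k : Nat) : ∀ (p t : List (Option Int)) (pad : Nat), p.length = k →
    (((List.range k).reverse).foldl stepCol
        (p ++ List.replicate pad none ++ t, ((List.range pad).map (fun i => k + i)).reverse)).1
      = List.replicate (pad + (p.length - (p.filterMap id).length)) none
          ++ (p.filterMap id).map some ++ t := by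
  induction k with
  | zero =>
    intro p t pad hp
    rw [List.length_eq_zero_iff] at hp
    subst hp
    simp
  | succ k ih =>
    intro p t pad hp
    rcases List.eq_nil_or_concat p with rfl | ⟨p', x, rfl⟩
    · simp at hp
    rw [List.concat_eq_append] at *
    have hp' : p'.length = k := by simp at hp; omega
    rw [List.range_succ, List.reverse_append]
    simp only [List.reverse_singleton, List.singleton_append, List.foldl_cons]
    have hread : ((p' ++ [x]) ++ List.replicate pad none ++ t).getD k none = x := by
      have h : (p' ++ [x]) ++ List.replicate pad none ++ t
          = p' ++ (x :: (List.replicate pad none ++ t)) := by simp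
      rw [h, ← hp']
      exact getD_append_len p' x _
    cases x with
    | none =>
      rw [stepCol_none _ _ _ hread]
      have hlist : (p' ++ [(none : Option Int)]) ++ List.replicate pad none ++ t
          = p' ++ List.replicate (pad + 1) none ++ t := by
        rw [List.replicate_succ]; simp
      rw [hlist, es_snoc k pad, ih p' t (pad + 1) hp']
      exact tail_none p' t pad
    | some v =>
      cases pad with
      | zero =>
        simp only [List.range_zero, List.map_nil, List.reverse_nil]
        rw [stepCol_some_nil _ _ _ hread]
        have hlist : (p' ++ [some v]) ++ List.replicate 0 none ++ t
            = p' ++ List.replicate 0 none ++ (some v :: t) := by simp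
        rw [hlist]
        have ihx := ih p' (some v :: t) 0 hp'
        simp only [List.range_zero, List.map_nil, List.reverse_nil] at ihx
        rw [ihx]
        exact tail_some p' t v 0
      | succ pad' =>
        rw [es_head k pad']
        rw [stepCol_some_cons _ _ _ _ _ hread]
        -- the double set: fill the lowest empty slot, empty position k
        have hset : (((p' ++ [some v]) ++ List.replicate (pad' + 1) none ++ t).set (k + 1 + pad')
              ((some v : Option Int))).set k none
            = p' ++ List.replicate (pad' + 1) none ++ (some v :: t) := by
          have hrep : List.replicate (pad' + 1) (none : Option Int)
              = List.replicate pad' none ++ [none] := List.replicate_succ'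
          have h1 : (p' ++ [some v]) ++ List.replicate (pad' + 1) none ++ t
              = ((p' ++ [some v]) ++ List.replicate pad' none) ++ ((none : Option Int) :: t) := by
            rw [hrep]; simp
          have hlen1 : ((p' ++ [some v]) ++ List.replicate pad' none).length = k + 1 + pad' := by
            simp [hp']
            omega
          rw [h1, show (k + 1 + pad') = ((p' ++ [some v]) ++ List.replicate pad' none).length
            from hlen1.symm]
          rw [List.set_append_right _ _ (le_refl _)]
          simp only [Nat.sub_self, List.set_cons_zero]
          have h2 : ((p' ++ [some v]) ++ List.replicate pad' none) ++ some v :: t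
              = p' ++ ((some v : Option Int) :: (List.replicate pad' none ++ some v :: t)) := by
            simp
          rw [h2, show k = p'.length from hp'.symm]
          rw [List.set_append_right _ _ (le_refl _)]
          simp only [Nat.sub_self, List.set_cons_zero]
          rw [hrep]
          simp [cons_none_replicate]
        rw [hset, es_snoc k pad', ih p' (some v :: t) (pad' + 1) hp']
        exact tail_some p' t v (pad' + 1)

-- ---- correspondence between grid cells and the abstract column ----
theorem setColumn_length (g : List (List (Option Int))) (c : Nat) (col : List (Option Int))
    (hlen : col.length = g.length) : (setColumn g c col).length = g.length := by
  simp [setColumn, hlen]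

theorem getCell_setColumn (g : List (List (Option Int))) (c : Nat) (col : List (Option Int))
    (hc : ∀ row ∈ g, c < row.length) (hlen : col.length = g.length) (r : Nat) :
    getCell (setColumn g c col) r c = col.getD r none := by
  by_cases hr : r < g.length
  · have h1 : (setColumn g c col).getD r [] = (g[r]).set c (col[r]'(by omega)) := by
      rw [List.getD_eq_getElem _ _ (by rw [setColumn_length g c col hlen]; exact hr)]
      simp [setColumn]
    have hcr : c < (g[r]).length := hc _ (List.getElem_mem hr)
    rw [getCell, h1, List.getD_eq_getElem _ _ (by simpa using hcr),
      List.getElem_set_self (by simpa using hcr), List.getD_eq_getElem _ _ (by omega)]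
  · have h1 : (setColumn g c col).getD r [] = [] :=
      List.getD_eq_default _ _ (by rw [setColumn_length g c col hlen]; omega)
    have h2 : col.getD r none = none := List.getD_eq_default _ _ (by omega)
    rw [getCell, h1, h2]
    rfl

theorem setCell_setColumn (g : List (List (Option Int))) (c : Nat) (col : List (Option Int))
    (_hc : ∀ row ∈ g, c < row.length) (hlen : col.length = g.length) (r : Nat) (v : Option Int) :
    setCell (setColumn g c col) r c v = setColumn g c (col.set r v) := by
  by_cases hr : r < g.length
  · have h1 : (setColumn g c col).getD r [] = (g[r]).set c (col[r]'(by omega)) := by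
      rw [List.getD_eq_getElem _ _ (by rw [setColumn_length g c col hlen]; exact hr)]
      simp [setColumn]
    rw [setCell, h1, List.set_set]
    apply List.ext_getElem
    · simp [setColumn, hlen]
    · intro i h1' h2'
      have hi : i < g.length := by simpa [setColumn, hlen] using h2'
      by_cases hir : i = r
      · subst hir
        rw [List.getElem_set_self (by simpa [setColumn, hlen] using hi)]
        simp only [setColumn, List.getElem_zipWith]
        rw [List.getElem_set_self (by simp; omega)]
      · rw [List.getElem_set_ne (by omega) (by simpa [setColumn, hlen] using hi)]
        simp only [setColumn, List.getElem_zipWith]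
        rw [List.getElem_set_ne (by omega) (by simp; omega)]
  · rw [setCell, List.set_eq_of_length_le (by rw [setColumn_length g c col hlen]; omega),
      List.set_eq_of_length_le (show col.length ≤ r by omega)]

theorem stepCol_length (col : List (Option Int)) (es : List Nat) (r : Nat) :
    ((stepCol (col, es) r).1).length = col.length := by
  unfold stepCol
  cases h : col.getD r none with
  | none => simp
  | some v => cases es with
    | nil => simp
    | cons e rest => simp

-- ---- lifting: the grid fold is the column fold on column c ----
theorem lift_foldA (g : List (List (Option Int))) (c : Nat)
    (hc : ∀ row ∈ g, c < row.length) :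
    ∀ (rs : List Nat) (col : List (Option Int)) (es : List Nat), col.length = g.length →
      rs.foldl (stepA c) (setColumn g c col, es)
        = (setColumn g c (rs.foldl stepCol (col, es)).1, (rs.foldl stepCol (col, es)).2) := by
  intro rs
  induction rs with
  | nil => intro col es _; rfl
  | cons r rs ih =>
    intro col es hlen
    have hstep : stepA c (setColumn g c col, es) r
        = (setColumn g c (stepCol (col, es) r).1, (stepCol (col, es) r).2) := by
      unfold stepA stepCol
      rw [show (setColumn g c col, es).1 = setColumn g c col from rfl]
      rw [getCell_setColumn g c col hc hlen r]
      cases h : col.getD r none with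
      | none => simp
      | some v =>
        cases es with
        | nil => simp
        | cons e rest =>
          simp only []
          rw [setCell_setColumn g c col hc hlen e (some v),
            setCell_setColumn g c (col.set e (some v)) hc (by simp [hlen]) r none]
    simp only [List.foldl_cons]
    rw [hstep, ih _ _ (by rw [stepCol_length]; exact hlen)]

theorem colA_eq (g : List (List (Option Int))) (c : Nat) (rows : Nat)
    (hrows : rows = g.length) (hc : ∀ row ∈ g, c < row.length) :
    (((List.range rows).reverse).foldl (stepA c) (g, ([] : List Nat))).1
      = setColumn g c (dropCol (colOf g c)) := by
  subst hrows
  have hcol : (colOf g c).length = g.length := by simp [colOf]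
  have hg : setColumn g c (colOf g c) = g := by
    apply List.ext_getElem
    · simp [setColumn, colOf]
    · intro i h1 h2
      have hi : i < g.length := by simpa [setColumn, colOf] using h1
      simp only [setColumn, colOf, List.getElem_zipWith, List.getElem_map]
      rw [List.getD_eq_getElem _ _ (hc _ (List.getElem_mem hi)), List.set_getElem_self]
  have hlift := lift_foldA g c hc ((List.range g.length).reverse) (colOf g c) [] hcol
  rw [hg] at hlift
  rw [hlift]
  have hloop := loopA g.length (colOf g c) [] 0 hcol
  simp only [List.replicate, List.append_nil, List.range_zero, List.map_nil,
    List.reverse_nil] at hloop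
  simp only []
  rw [hloop]
  simp [dropCol]

theorem lift_foldB (g : List (List (Option Int))) (c : Nat)
    (hc : ∀ row ∈ g, c < row.length) (pad : Nat) (gems : List Int) :
    ∀ (rs : List Nat) (col : List (Option Int)), col.length = g.length →
      rs.foldl (stepB c pad gems) (setColumn g c col)
        = setColumn g c (rs.foldl
            (fun col r => col.set r (if r < pad then none else some (gems.getD (r - pad) 0)))
            col) := by
  intro rs
  induction rs with
  | nil => intro col _; rfl
  | cons r rs ih =>
    intro col hlen
    simp only [List.foldl_cons, stepB]
    rw [setCell_setColumn g c col hc hlen r _]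
    exact ih _ (by simp [hlen])

theorem mapFold (f : Nat → Option Int) : ∀ (n : Nat) (col : List (Option Int)),
    n ≤ col.length →
    (List.range n).foldl (fun col r => col.set r (f r)) col
      = (List.range n).map f ++ col.drop n := by
  intro n
  induction n with
  | zero => intro col _; simp
  | succ n ih =>
    intro col h
    rw [List.range_succ, List.foldl_append, List.foldl_cons, List.foldl_nil, ih col (by omega)]
    have hdrop : List.drop n col = col[n]'(by omega) :: List.drop (n + 1) col :=
      List.drop_eq_getElem_cons (by omega)
    rw [hdrop, List.set_append_right n (f n) (by simp),
      show n - (List.map f (List.range n)).length = 0 from by simp, List.set_cons_zero]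
    simp

theorem mapB (col : List (Option Int)) :
    (List.range col.length).map (fun r =>
        if r < col.length - (col.filterMap id).length then none
        else some ((col.filterMap id).getD (r - (col.length - (col.filterMap id).length)) 0))
      = dropCol col := by
  have hG : (col.filterMap id).length ≤ col.length := length_filterMap_le' col
  have hG' : (List.filterMap (fun x : Option Int => x) col).length ≤ col.length := hG
  apply List.ext_getElem
  · simp [dropCol]
    omega
  · intro i h1 h2
    have hi : i < col.length := by simpa using h1
    simp only [List.getElem_map, List.getElem_range]
    by_cases hip : i < col.length - (col.filterMap id).length
    · have hip' : i < col.length - (List.filterMap (fun x : Option Int => x) col).length := hip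
      rw [if_pos hip]
      simp only [dropCol]
      rw [List.getElem_append_left (by simpa using hip)]
      simp
    · have hip' : ¬ i < col.length - (List.filterMap (fun x : Option Int => x) col).length := hip
      rw [if_neg hip]
      simp only [dropCol]
      rw [List.getElem_append_right (by simp; omega)]
      simp only [List.getElem_map, List.length_replicate]
      rw [List.getD_eq_getElem _ _ (by omega)]

theorem colB_eq (g : List (List (Option Int))) (c : Nat) (rows : Nat)
    (hrows : rows = g.length) (hc : ∀ row ∈ g, c < row.length) :
    (List.range rows).foldl
        (stepB c (rows - ((List.range rows).filterMap (fun r => getCell g r c)).length)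
          ((List.range rows).filterMap (fun r => getCell g r c))) g
      = setColumn g c (dropCol (colOf g c)) := by
  subst hrows
  have hcol : (colOf g c).length = g.length := by simp [colOf]
  have hcolmap : colOf g c = (List.range g.length).map (fun r => getCell g r c) := by
    apply List.ext_getElem
    · simp [colOf]
    · intro i h1 h2
      have hi : i < g.length := by simpa [colOf] using h1
      simp only [colOf, List.getElem_map, List.getElem_range]
      rw [getCell, List.getD_eq_getElem g [] hi]
  have hmap : (List.range g.length).filterMap (fun r => getCell g r c)
      = (colOf g c).filterMap id := by
    rw [hcolmap, List.filterMap_map]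
    rfl
  rw [hmap]
  have hg : setColumn g c (colOf g c) = g := by
    apply List.ext_getElem
    · simp [setColumn, colOf]
    · intro i h1 h2
      have hi : i < g.length := by simpa [setColumn, colOf] using h1
      simp only [setColumn, colOf, List.getElem_zipWith, List.getElem_map]
      rw [List.getD_eq_getElem _ _ (hc _ (List.getElem_mem hi)), List.set_getElem_self]
  have hlift := lift_foldB g c hc (g.length - ((colOf g c).filterMap id).length)
    ((colOf g c).filterMap id) (List.range g.length) (colOf g c) hcol
  rw [hg] at hlift
  rw [hlift]
  congr 1
  rw [mapFold _ g.length (colOf g c) (by omega), List.drop_of_length_le (by omega),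
    List.append_nil]

  have := mapB (colOf g c)
  rw [hcol] at this
  exact this

-- ---- the per-column transforms preserve the grid shape ----
theorem dropCol_length (col : List (Option Int)) : (dropCol col).length = col.length := by
  have hG : (List.filterMap (fun x : Option Int => x) col).length ≤ col.length :=
    List.length_filterMap_le _ _
  simp [dropCol]
  omega

theorem setColumn_shape (g : List (List (Option Int))) (c : Nat) (col : List (Option Int))
    (hlen : col.length = g.length) :
    ∀ row' ∈ setColumn g c col, ∃ row ∈ g, row'.length = row.length := by
  intro row' hrow'
  rw [List.mem_iff_getElem] at hrow'
  obtain ⟨i, hi, rfl⟩ := hrow'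
  have hig : i < g.length := by simpa [setColumn, hlen] using hi
  refine ⟨g[i], List.getElem_mem hig, ?_⟩
  simp [setColumn]

-- ---- top-level: the two column-by-column folds agree ----
theorem topFold (rows : Nat) : ∀ (cs : List Nat) (g : List (List (Option Int))),
    g.length = rows → (∀ c ∈ cs, ∀ row ∈ g, c < row.length) →
    cs.foldl (fun g c => (((List.range rows).reverse).foldl (stepA c) (g, ([] : List Nat))).1) g
      = cs.foldl (fun g c =>
          (List.range rows).foldl
            (stepB c (rows - ((List.range rows).filterMap (fun r => getCell g r c)).length)
              ((List.range rows).filterMap (fun r => getCell g r c))) g) g := by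
  intro cs
  induction cs with
  | nil => intro g _ _; rfl
  | cons c cs ih =>
    intro g hlen hc
    have hcc : ∀ row ∈ g, c < row.length := fun row hrow => hc c (by simp) row hrow
    simp only [List.foldl_cons]
    rw [colA_eq g c rows hlen.symm hcc, colB_eq g c rows hlen.symm hcc]
    have hdl : (dropCol (colOf g c)).length = g.length := by
      rw [dropCol_length]; simp [colOf]
    apply ih
    · rw [setColumn_length g c _ hdl, hlen]
    · intro c' hc' row' hrow'
      obtain ⟨row, hrow, hlen'⟩ := setColumn_shape g c _ hdl row' hrow'
      rw [hlen']
      exact hc c' (by simp [hc']) row hrow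

-- ===== VERDICT (by name: the statement is the Claim_ definition above) =====
theorem drop_gems_spec : Claim_equal_drop_gems := by
  intro g _ hPre
  obtain ⟨hne, hrows⟩ := hPre
  show drop_gems g = drop_gems_alt g
  unfold drop_gems drop_gems_alt
  exact topFold g.length (List.range ((g.headD []).length)) g rfl
    (fun c hcmem row hrow => lt_of_lt_of_le (List.mem_range.mp hcmem) (hrows row hrow))
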